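-- pv_equiv track=rewrite | github.com/0x7c2/cpme | logme.py | html_build_nav
-- ===== SOURCE A (Python) =====
-- from operator import itemgetter
--
-- def html_build_nav(res):
-- 	last = ""
-- 	cats = []
-- 	sort_res = sorted(res, key=itemgetter(3))
-- 	for entry in sort_res:
-- 		if last != entry[3]:
-- 			cats.append(entry[3])
-- 			last = entry[3]
-- 	html  = ""
-- 	html += "<nav class='navbar navbar-expand-xl navbar-light bg-light fixed-top'> \n"
-- 	html += " <a class='navbar-brand' href='#'>CPme - Report</a> \n"
-- 	html += " <button class='navbar-toggler' type='button' data-toggle='collapse' data-target='#navbarSupportedContent' aria-controls='navbarSupportedContent' aria-expanded='false' aria-label='Toggle navigation'> \n"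
-- 	html += "  <span class='navbar-toggler-icon'></span> \n"
-- 	html += " </button> \n"
-- 	html += " <div class='collapse navbar-collapse' id='navbarSupportedContent'> \n"
-- 	html += "  <ul class='nav navbar-nav'> \n"
-- 	for e in cats:
-- 		html += "   <li class='nav-item'><a class='nav-link' href='#" + e + "'>" + e + "</a></li> \n"
-- 	html += "  </ul> \n"
-- 	html += " </div> \n"
-- 	html += "</nav> \n"
-- 	return html
-- ===== SOURCE B (Python) =====
-- def html_build_nav(res):
-- 	cats = sorted({entry[3] for entry in res})
-- 	lines = [
-- 		"<nav class='navbar navbar-expand-xl navbar-light bg-light fixed-top'> \n",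
-- 		" <a class='navbar-brand' href='#'>CPme - Report</a> \n",
-- 		" <button class='navbar-toggler' type='button' data-toggle='collapse' data-target='#navbarSupportedContent' aria-controls='navbarSupportedContent' aria-expanded='false' aria-label='Toggle navigation'> \n",
-- 		"  <span class='navbar-toggler-icon'></span> \n",
-- 		" </button> \n",
-- 		" <div class='collapse navbar-collapse' id='navbarSupportedContent'> \n",
-- 		"  <ul class='nav navbar-nav'> \n",
-- 	]
-- 	lines += ["   <li class='nav-item'><a class='nav-link' href='#" + e + "'>" + e + "</a></li> \n" for e in cats]
-- 	lines += ["  </ul> \n", " </div> \n", "</nav> \n"]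
-- 	return "".join(lines)
-- ===== Notes on version B (the rewrite author's own statement) =====
-- stated objective: simpler
-- what changed: B dedups categories into a set first and sorts only the distinct values (instead of sorting every entry and stripping adjacent repeats with a last-seen sentinel), and builds the HTML by joining a list of lines instead of += accumulation.
-- intended difference: On inputs where some entry[3] is the empty string, A's sentinel last = "" silently drops that category from the nav while B lists it like any other distinct category, which is the intended 'one link per distinct category' behaviour. — e.g. on html_build_nav([["a", "b", "c", ""]]): A returns "<nav class='navbar navbar-expand-xl navbar-light bg-light fixed-top'> \n <a class='navbar-brand' href='#'>CPme - Repor…, B returns "<nav class='navbar navbar-expand-xl navbar-light bg-light fixed-top'> \n <a class='navbar-brand' href='#'>CPme - Repor…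
import Mathlib
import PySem

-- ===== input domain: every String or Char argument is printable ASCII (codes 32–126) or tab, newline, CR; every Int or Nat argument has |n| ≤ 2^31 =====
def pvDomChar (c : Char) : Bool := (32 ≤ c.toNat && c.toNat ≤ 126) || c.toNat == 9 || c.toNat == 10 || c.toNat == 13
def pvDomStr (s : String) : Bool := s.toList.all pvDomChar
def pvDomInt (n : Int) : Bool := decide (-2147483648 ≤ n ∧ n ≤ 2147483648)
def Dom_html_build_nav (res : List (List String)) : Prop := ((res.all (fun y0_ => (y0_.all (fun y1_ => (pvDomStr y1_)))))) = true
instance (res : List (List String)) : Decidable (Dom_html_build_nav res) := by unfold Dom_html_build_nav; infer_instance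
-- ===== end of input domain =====

-- B replaces A's sort-everything-then-adjacent-dedup loop by a set dedup followed by sorting the
-- distinct categories, and builds the HTML by joining a list of lines instead of += accumulation
-- (objective: simpler). A's sentinel last = "" silently drops an empty-string category; B keeps it (D_ below).

-- ===== PORT A =====
-- entry[3]; Pre_ guarantees 4 ≤ entry.length, where getD is exact
def pvCat (e : List String) : String := e.getD 3 ""

def pvLi (e : String) : String :=
  "   <li class='nav-item'><a class='nav-link' href='#" ++ e ++ "'>" ++ e ++ "</a></li> \n"

def html_build_nav (res : List (List String)) : String :=
  let sort_res := PySem.List.sorted res pvCat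
  let st := sort_res.foldl
    (fun (p : String × List String) entry =>
      if p.1 ≠ pvCat entry then (pvCat entry, p.2 ++ [pvCat entry]) else p) ("", [])
  let cats := st.2
  let html : String := ""
  let html := html ++ "<nav class='navbar navbar-expand-xl navbar-light bg-light fixed-top'> \n"
  let html := html ++ " <a class='navbar-brand' href='#'>CPme - Report</a> \n"
  let html := html ++ " <button class='navbar-toggler' type='button' data-toggle='collapse' data-target='#navbarSupportedContent' aria-controls='navbarSupportedContent' aria-expanded='false' aria-label='Toggle navigation'> \n"
  let html := html ++ "  <span class='navbar-toggler-icon'></span> \n"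
  let html := html ++ " </button> \n"
  let html := html ++ " <div class='collapse navbar-collapse' id='navbarSupportedContent'> \n"
  let html := html ++ "  <ul class='nav navbar-nav'> \n"
  let html := cats.foldl (fun h e => h ++ pvLi e) html
  let html := html ++ "  </ul> \n"
  let html := html ++ " </div> \n"
  let html := html ++ "</nav> \n"
  html

-- ===== PORT B =====
def pvHeaderLines : List String :=
  ["<nav class='navbar navbar-expand-xl navbar-light bg-light fixed-top'> \n",
   " <a class='navbar-brand' href='#'>CPme - Report</a> \n",
   " <button class='navbar-toggler' type='button' data-toggle='collapse' data-target='#navbarSupportedContent' aria-controls='navbarSupportedContent' aria-expanded='false' aria-label='Toggle navigation'> \n",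
   "  <span class='navbar-toggler-icon'></span> \n",
   " </button> \n",
   " <div class='collapse navbar-collapse' id='navbarSupportedContent'> \n",
   "  <ul class='nav navbar-nav'> \n"]

def pvFooterLines : List String := ["  </ul> \n", " </div> \n", "</nav> \n"]

def html_build_nav_alt (res : List (List String)) : String :=
  let cats := PySem.List.sorted (PySem.Set.ofList (res.map pvCat)) (fun x => x)
  PySem.Str.join "" (pvHeaderLines ++ cats.map pvLi ++ pvFooterLines)

-- ===== PRECONDITION & SPEC =====
-- Pre_ excludes exactly the inputs where Python A raises IndexError: an entry shorter than 4 elements.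
def Pre_html_build_nav (res : List (List String)) : Prop := ∀ e ∈ res, 4 ≤ e.length
instance (res : List (List String)) : Decidable (Pre_html_build_nav res) := by
  unfold Pre_html_build_nav; infer_instance
def pvWitness_html_build_nav : List (List String) := [["a", "b", "c", "d"]]

-- On inputs where some entry's category entry[3] is the empty string, A's sentinel last = "" makes the
-- dedup loop silently drop that category from the nav, while B lists it like any other category, which
-- is the intended behaviour of "one nav link per distinct category".
def D_html_build_nav (res : List (List String)) : Prop := ∃ e ∈ res, e.getD 3 "" = ""
instance (res : List (List String)) : Decidable (D_html_build_nav res) := by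
  unfold D_html_build_nav; infer_instance

def Spec_html_build_nav (res : List (List String)) (out : String) : Prop :=
  ¬ D_html_build_nav res → out = html_build_nav_alt res
instance (res : List (List String)) (out : String) : Decidable (Spec_html_build_nav res out) := by
  unfold Spec_html_build_nav; infer_instance

def pvDiffWitness_html_build_nav : List (List String) := [["a", "b", "c", ""]]
def pvDiffWitnessOut_html_build_nav : String × String :=
  ("<nav class='navbar navbar-expand-xl navbar-light bg-light fixed-top'> \n <a class='navbar-brand' href='#'>CPme - Report</a> \n <button class='navbar-toggler' type='button' data-toggle='collapse' data-target='#navbarSupportedContent' aria-controls='navbarSupportedContent' aria-expanded='false' aria-label='Toggle navigation'> \n  <span class='navbar-toggler-icon'></span> \n </button> \n <div class='collapse navbar-collapse' id='navbarSupportedContent'> \n  <ul class='nav navbar-nav'> \n  </ul> \n </div> \n</nav> \n",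
   "<nav class='navbar navbar-expand-xl navbar-light bg-light fixed-top'> \n <a class='navbar-brand' href='#'>CPme - Report</a> \n <button class='navbar-toggler' type='button' data-toggle='collapse' data-target='#navbarSupportedContent' aria-controls='navbarSupportedContent' aria-expanded='false' aria-label='Toggle navigation'> \n  <span class='navbar-toggler-icon'></span> \n </button> \n <div class='collapse navbar-collapse' id='navbarSupportedContent'> \n  <ul class='nav navbar-nav'> \n   <li class='nav-item'><a class='nav-link' href='#'></a></li> \n  </ul> \n </div> \n</nav> \n")

-- ===== CLAIM (what is proved, stated in full; the proofs are below) =====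
def Claim_unchanged_html_build_nav : Prop :=
  ∀ (res : List (List String)), Dom_html_build_nav res → Pre_html_build_nav res →
    Spec_html_build_nav res (html_build_nav res)
def Claim_changed_html_build_nav : Prop :=
  Dom_html_build_nav (pvDiffWitness_html_build_nav) ∧
  Pre_html_build_nav (pvDiffWitness_html_build_nav) ∧
  D_html_build_nav (pvDiffWitness_html_build_nav) ∧
  html_build_nav (pvDiffWitness_html_build_nav) = pvDiffWitnessOut_html_build_nav.1 ∧
  html_build_nav_alt (pvDiffWitness_html_build_nav) = pvDiffWitnessOut_html_build_nav.2 ∧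
  pvDiffWitnessOut_html_build_nav.1 ≠ pvDiffWitnessOut_html_build_nav.2
def Claim_exact_html_build_nav : Prop :=
  ∀ (res : List (List String)), Dom_html_build_nav res → Pre_html_build_nav res →
    D_html_build_nav res → html_build_nav res ≠ html_build_nav_alt res

-- ===== LEMMAS AND PROOFS =====

theorem str_empty_le (s : String) : ("" : String) ≤ s := by
  rw [String.le_iff_toList_le, String.toList_empty]
  cases h : s.toList with
  | nil => exact le_rfl
  | cons c cs => exact (List.nil_lt_cons c cs).le

-- the adjacent-dedup loop of A, on the list of category keys
def ddAdj : String → List String → List String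
  | _, [] => []
  | last, x :: xs => if last ≠ x then x :: ddAdj x xs else ddAdj last xs

theorem foldl_dd (l : List (List String)) (last : String) (acc : List String) :
    (l.foldl (fun (p : String × List String) entry =>
        if p.1 ≠ pvCat entry then (pvCat entry, p.2 ++ [pvCat entry]) else p) (last, acc)).2
      = acc ++ ddAdj last (l.map pvCat) := by
  induction l generalizing last acc with
  | nil => simp [ddAdj]
  | cons e t ih =>
    simp only [List.map_cons, List.foldl_cons, ddAdj]
    by_cases h : last ≠ pvCat e
    · rw [if_pos h, if_pos h, ih]
      simp
    · rw [if_neg h, if_neg h, ih]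

theorem ddAdj_spec (S : List String) (last : String)
    (hp : S.Pairwise (· ≤ ·)) (hl : ∀ x ∈ S, last ≤ x) :
    (∀ y, y ∈ ddAdj last S ↔ (y ∈ S ∧ y ≠ last)) ∧
    (ddAdj last S).Pairwise (· < ·) ∧ (∀ y ∈ ddAdj last S, last < y) := by
  induction S generalizing last with
  | nil => simp [ddAdj]
  | cons x xs ih =>
    rcases List.pairwise_cons.mp hp with ⟨hx, hxs⟩
    by_cases h : last = x
    · subst h
      have H := ih last hxs hx
      have e1 : ddAdj last (last :: xs) = ddAdj last xs := by
        rw [ddAdj, if_neg (not_not_intro rfl)]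
      rw [e1]
      refine ⟨?_, H.2.1, H.2.2⟩
      intro y
      rw [H.1 y]
      constructor
      · rintro ⟨hy, hne⟩
        exact ⟨List.mem_cons_of_mem _ hy, hne⟩
      · rintro ⟨hy, hne⟩
        rcases List.mem_cons.mp hy with rfl | hy'
        · exact absurd rfl hne
        · exact ⟨hy', hne⟩
    · have hlx : last < x := lt_of_le_of_ne (hl x (List.mem_cons_self)) h
      have H := ih x hxs hx
      have e1 : ddAdj last (x :: xs) = x :: ddAdj x xs := by
        rw [ddAdj, if_pos h]
      rw [e1]
      refine ⟨?_, ?_, ?_⟩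
      · intro y
        rw [List.mem_cons, List.mem_cons, H.1 y]
        constructor
        · rintro (rfl | ⟨hy, hne⟩)
          · exact ⟨Or.inl rfl, fun e => h e.symm⟩
          · exact ⟨Or.inr hy, ne_of_gt (lt_of_lt_of_le hlx (hx y hy))⟩
        · rintro ⟨rfl | hy, hne⟩
          · exact Or.inl rfl
          · by_cases e : y = x
            · exact Or.inl e
            · exact Or.inr ⟨hy, e⟩
      · exact List.pairwise_cons.mpr ⟨H.2.2, H.2.1⟩
      · intro y hy
        rcases List.mem_cons.mp hy with rfl | hy'
        · exact hlx
        · exact hlx.trans (H.2.2 y hy')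

-- the two distinct-category lists, compared
theorem cats_eq (res : List (List String)) :
    ("" ∉ res.map pvCat →
      ddAdj "" ((PySem.List.sorted res pvCat).map pvCat)
        = PySem.List.sorted (PySem.Set.ofList (res.map pvCat)) (fun x => x)) ∧
    ("" ∈ res.map pvCat →
      PySem.List.sorted (PySem.Set.ofList (res.map pvCat)) (fun x => x)
        = "" :: ddAdj "" ((PySem.List.sorted res pvCat).map pvCat)) := by
  set S := (PySem.List.sorted res pvCat).map pvCat with hS
  have hSp : S.Pairwise (· ≤ ·) := PySem.List.sorted_map_key_pairwise res pvCat
  have hmemS : ∀ y, y ∈ S ↔ y ∈ res.map pvCat := fun y =>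
    ((PySem.List.sorted_perm res pvCat false).map pvCat).mem_iff
  have hdd := ddAdj_spec S "" hSp (fun x _ => str_empty_le x)
  set C := PySem.List.sorted (PySem.Set.ofList (res.map pvCat)) (fun x => x) with hC
  have hCp : C.Pairwise (· < ·) := PySem.List.sorted_ofList_pairwise_lt (res.map pvCat)
  have hmemC : ∀ y, y ∈ C ↔ y ∈ res.map pvCat := fun y => by
    rw [hC, PySem.List.mem_sorted, PySem.Set.mem_ofList]
  have hnodupC : C.Nodup := hCp.imp ne_of_lt
  have hnodupD : (ddAdj "" S).Nodup := hdd.2.1.imp ne_of_lt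
  constructor
  · intro hno
    have hperm : (ddAdj "" S).Perm C := by
      rw [List.perm_ext_iff_of_nodup hnodupD hnodupC]
      intro y
      rw [hdd.1 y, hmemC y, hmemS y]
      constructor
      · exact fun h => h.1
      · intro h
        exact ⟨h, fun e => hno (e ▸ h)⟩
    exact PySem.List.eq_of_perm_of_pairwise_le_of_injective (fun x => x)
      (fun _ _ e => e) hperm (hdd.2.1.imp le_of_lt) (hCp.imp le_of_lt)
  · intro hyes
    have hnodup' : ("" :: ddAdj "" S).Nodup :=
      List.nodup_cons.mpr ⟨fun h => absurd (hdd.2.2 _ h) (lt_irrefl _), hnodupD⟩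
    have hperm : C.Perm ("" :: ddAdj "" S) := by
      rw [List.perm_ext_iff_of_nodup hnodupC hnodup']
      intro y
      rw [hmemC y, List.mem_cons, hdd.1 y, hmemS y]
      constructor
      · intro h
        by_cases e : y = ""
        · exact Or.inl e
        · exact Or.inr ⟨h, e⟩
      · rintro (rfl | h)
        · exact hyes
        · exact h.1
    have hp' : ("" :: ddAdj "" S).Pairwise (· < ·) :=
      List.pairwise_cons.mpr ⟨hdd.2.2, hdd.2.1⟩
    exact PySem.List.eq_of_perm_of_pairwise_le_of_injective (fun x => x)
      (fun _ _ e => e) hperm (hCp.imp le_of_lt) (hp'.imp le_of_lt)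

theorem strJoin_empty_nil : PySem.Str.join "" ([] : List String) = "" := by
  simp [PySem.Str.join, PySem.Chars.join_nil]

theorem strJoin_empty_cons (a : String) (l : List String) :
    PySem.Str.join "" (a :: l) = a ++ PySem.Str.join "" l := by
  cases l with
  | nil => simp [PySem.Str.join, PySem.Chars.join_singleton, PySem.Chars.join_nil]
  | cons b t => simp [PySem.Str.join, PySem.Chars.join_cons_cons]

theorem foldl_li (cs : List String) (acc : String) :
    cs.foldl (fun h e => h ++ pvLi e) acc = acc ++ PySem.Str.join "" (cs.map pvLi) := by
  induction cs generalizing acc with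
  | nil => simp [PySem.Str.join, PySem.Chars.join_nil]
  | cons c t ih =>
    rw [List.foldl_cons, ih, List.map_cons, strJoin_empty_cons, String.append_assoc]

-- both html strings, as a function of the category list each port derived
theorem htmlA_shape (res : List (List String)) :
    html_build_nav res
      = PySem.Str.join "" pvHeaderLines
        ++ PySem.Str.join "" ((ddAdj "" ((PySem.List.sorted res pvCat).map pvCat)).map pvLi)
        ++ PySem.Str.join "" pvFooterLines := by
  show (List.foldl _ _ _ ++ _ ++ _ ++ _) = _
  rw [foldl_dd, List.nil_append, foldl_li]
  simp only [pvHeaderLines, pvFooterLines, strJoin_empty_cons, strJoin_empty_nil]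
  simp only [String.append_assoc, String.append_empty, String.empty_append]

theorem strJoin_empty_append (l₁ l₂ : List String) :
    PySem.Str.join "" (l₁ ++ l₂) = PySem.Str.join "" l₁ ++ PySem.Str.join "" l₂ := by
  induction l₁ with
  | nil => simp [PySem.Str.join, PySem.Chars.join_nil]
  | cons a t ih => rw [List.cons_append, strJoin_empty_cons, strJoin_empty_cons, ih,
      String.append_assoc]

theorem htmlB_shape (res : List (List String)) :
    html_build_nav_alt res
      = PySem.Str.join "" pvHeaderLines
        ++ PySem.Str.join ""
            ((PySem.List.sorted (PySem.Set.ofList (res.map pvCat)) (fun x => x)).map pvLi)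
        ++ PySem.Str.join "" pvFooterLines := by
  show PySem.Str.join "" (pvHeaderLines ++ _ ++ pvFooterLines) = _
  rw [strJoin_empty_append, strJoin_empty_append, String.append_assoc]

-- ===== VERDICT (by name: the statement is the Claim_ definition above) =====
theorem html_build_nav_spec : Claim_unchanged_html_build_nav := by
  intro res _ _ hnd
  have hno : "" ∉ res.map pvCat := by
    intro h
    exact hnd (by
      rcases List.mem_map.mp h with ⟨e, he, hc⟩
      exact ⟨e, he, hc⟩)
  rw [htmlA_shape, htmlB_shape, (cats_eq res).1 hno]

set_option maxRecDepth 40000 in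
set_option maxHeartbeats 2000000 in
theorem html_build_nav_changed : Claim_changed_html_build_nav := by
  unfold Claim_changed_html_build_nav
  refine ⟨by decide, ?_, ?_, ?_, ?_, by decide⟩
  · intro e he; simp [pvDiffWitness_html_build_nav] at he; simp [he]
  · exact ⟨["a","b","c",""], by simp [pvDiffWitness_html_build_nav], rfl⟩
  · decide
  · decide

theorem html_build_nav_tight : Claim_exact_html_build_nav := by
  intro res _ _ hd
  obtain ⟨e, he, hc⟩ := hd
  have hmem : "" ∈ res.map pvCat := List.mem_map.mpr ⟨e, he, hc⟩
  rw [htmlA_shape, htmlB_shape, (cats_eq res).2 hmem, List.map_cons, strJoin_empty_cons]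
  intro h
  have hlen := congrArg PySem.Str.len h
  simp only [PySem.Str.len_append] at hlen
  have h62 : PySem.Str.len (pvLi "") = 64 := by decide
  omega
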